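-- pv_equiv track=rewrite | github.com/Atakan-Emre/PeptiProp | scripts/legacy/build_geppri_pair_dataset.py | contiguous_runs
-- ===== SOURCE A (Python) =====
-- def contiguous_runs(labels: list[int], value: int = 1) -> list[tuple[int, int]]:
--     runs = []
--     i = 0
--     n = len(labels)
--     while i < n:
--         if labels[i] != value:
--             i += 1
--             continue
--         j = i
--         while j < n and labels[j] == value:
--             j += 1
--         runs.append((i, j))
--         i = j
--     return runs
-- ===== SOURCE B (Python) =====
-- def contiguous_runs(labels: list[int], value: int = 1) -> list[tuple[int, int]]:
--     runs = []
--     start = None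
--     for i, x in enumerate(labels):
--         if x == value:
--             if start is None:
--                 start = i
--         elif start is not None:
--             runs.append((start, i))
--             start = None
--     if start is not None:
--         runs.append((start, len(labels)))
--     return runs
-- ===== Notes on version B (the rewrite author's own statement) =====
-- stated objective: idiomatic
-- what changed: Replaced the outer-skip/inner-extend nested while loops over indices with a single flat enumerate pass keeping an optional run-start state (start=None / start=i), flushing a run on each value->non-value transition and once after the loop.
import Mathlib
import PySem

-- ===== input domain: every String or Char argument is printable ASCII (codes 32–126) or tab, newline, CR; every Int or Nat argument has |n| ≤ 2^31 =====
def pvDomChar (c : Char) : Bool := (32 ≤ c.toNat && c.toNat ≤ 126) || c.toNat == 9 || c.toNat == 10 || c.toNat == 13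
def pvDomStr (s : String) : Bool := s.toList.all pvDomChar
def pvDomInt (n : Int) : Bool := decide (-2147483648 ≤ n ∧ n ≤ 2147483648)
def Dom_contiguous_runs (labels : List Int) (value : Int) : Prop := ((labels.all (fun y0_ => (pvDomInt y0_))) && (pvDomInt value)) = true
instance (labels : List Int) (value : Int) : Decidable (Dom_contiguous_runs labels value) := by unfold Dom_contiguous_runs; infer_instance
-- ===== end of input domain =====

-- B replaces A's nested while loops by one flat enumerate pass with an optional
-- run-start state (idiomatic single pass; same O(n) cost).

-- ===== PORT A =====
-- inner loop: 'while j < n and labels[j] == value: j += 1'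
def runInner (labels : List Int) (value n j : Int) : Int :=
  if _h : j < n ∧ PySem.List.pyGetD labels j 0 = value then
    runInner labels value n (j + 1)
  else j
termination_by (n - j).toNat
decreasing_by omega

-- j ≤ (result of the inner loop started at j); cited by runOuter's decreasing_by
lemma runInner_ge (labels : List Int) (value n : Int) (j : Int) :
    j ≤ runInner labels value n j := by
  have H : ∀ (k : Nat) (j : Int), (n - j).toNat = k → j ≤ runInner labels value n j := by
    intro k
    induction k using Nat.strong_induction_on with
    | _ k IH =>
      intro j hk
      unfold runInner
      split
      · rename_i h
        have := IH (n - (j + 1)).toNat (by omega) (j + 1) rfl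
        omega
      · omega
  exact H _ j rfl

-- outer loop of A
def runOuter (labels : List Int) (value n i : Int) (runs : List (Int × Int)) : List (Int × Int) :=
  if h : i < n then
    if hne : PySem.List.pyGetD labels i 0 ≠ value then
      runOuter labels value n (i + 1) runs
    else
      let j := runInner labels value n i
      runOuter labels value n j (runs ++ [(i, j)])
  else runs
termination_by (n - i).toNat
decreasing_by
  · omega
  · have hstep : runInner labels value n i = runInner labels value n (i + 1) := by
      rw [runInner]
      simp [h, not_not.mp hne]
    have hge := runInner_ge labels value n (i + 1)
    simp only [hstep]
    omega

def contiguous_runs (labels : List Int) (value : Int) : List (Int × Int) :=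
  runOuter labels value (PySem.List.len labels) 0 []

-- ===== PORT B =====
-- loop body of B's single enumerate pass: state = (start, runs)
def altStep (value : Int) (st : Option Int × List (Int × Int)) (p : Int × Int) :
    Option Int × List (Int × Int) :=
  if p.2 = value then
    match st.1 with
    | none => (some p.1, st.2)
    | some _ => st
  else
    match st.1 with
    | none => st
    | some s => (none, st.2 ++ [(s, p.1)])

-- trailing 'if start is not None: runs.append((start, len(labels)))'
def altFinish (n : Int) (r : Option Int × List (Int × Int)) : List (Int × Int) :=
  match r with
  | (none, runs) => runs
  | (some s, runs) => runs ++ [(s, n)]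

def contiguous_runs_alt (labels : List Int) (value : Int) : List (Int × Int) :=
  altFinish (PySem.List.len labels)
    ((PySem.List.enumerate labels).foldl (altStep value) (none, []))

-- ===== PRECONDITION & SPEC =====
def Spec_contiguous_runs (labels : List Int) (value : Int) (out : List (Int × Int)) : Prop := out = contiguous_runs_alt labels value
instance (labels : List Int) (value : Int) (out : List (Int × Int)) : Decidable (Spec_contiguous_runs labels value out) := by unfold Spec_contiguous_runs; infer_instance

-- ===== CLAIM (what is proved, stated in full; the proofs are below) =====
def Claim_equal_contiguous_runs : Prop := ∀ (labels : List Int) (value : Int), Dom_contiguous_runs labels value → Spec_contiguous_runs labels value (contiguous_runs labels value)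

-- ===== LEMMAS AND PROOFS =====

-- length of the maximal prefix of xs equal to v
def leadCount (v : Int) : List Int → Nat
  | [] => 0
  | x :: xs => if x = v then leadCount v xs + 1 else 0

-- canonical structural recursion both ports are reduced to
def goRuns (v : Int) : List Int → Int → Option Int → List (Int × Int)
  | [], _, none => []
  | [], i, some s => [(s, i)]
  | x :: xs, i, none =>
      if x = v then goRuns v xs (i + 1) (some i) else goRuns v xs (i + 1) none
  | x :: xs, i, some s =>
      if x = v then goRuns v xs (i + 1) (some s) else (s, i) :: goRuns v xs (i + 1) none

lemma leadCount_le (v : Int) (xs : List Int) : leadCount v xs ≤ xs.length := by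
  induction xs with
  | nil => simp [leadCount]
  | cons x xs ih =>
    simp only [leadCount, List.length_cons]
    split <;> omega

lemma goRuns_some (v : Int) : ∀ (xs : List Int) (i s : Int),
    goRuns v xs i (some s) =
      (s, i + (leadCount v xs : Int)) ::
        goRuns v (xs.drop (leadCount v xs)) (i + (leadCount v xs : Int)) none := by
  intro xs
  induction xs with
  | nil => intro i s; simp [goRuns, leadCount]
  | cons x xs ih =>
    intro i s
    by_cases hx : x = v
    · have h1 : leadCount v (x :: xs) = leadCount v xs + 1 := by simp [leadCount, hx]
      have h2 : goRuns v (x :: xs) i (some s) = goRuns v xs (i + 1) (some s) := by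
        simp [goRuns, hx]
      have h3 : i + ((leadCount v xs + 1 : Nat) : Int) = i + 1 + (leadCount v xs : Int) := by
        push_cast; ring
      rw [h2, ih, h1, List.drop_succ_cons, h3]
    · simp [goRuns, leadCount, hx]

lemma fold_eq (v : Int) : ∀ (xs : List Int) (i : Int) (st : Option Int)
    (acc : List (Int × Int)) (N : Int), N = i + (xs.length : Int) →
    altFinish N ((PySem.List.enumerate xs i).foldl (altStep v) (st, acc))
      = acc ++ goRuns v xs i st := by
  intro xs
  induction xs with
  | nil =>
    intro i st acc N hN
    cases st <;> simp_all [PySem.List.enumerate_nil, goRuns, altFinish]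
  | cons x xs ih =>
    intro i st acc N hN
    have hN' : N = (i + 1) + (xs.length : Int) := by
      rw [hN]; simp only [List.length_cons]; push_cast; ring
    rw [PySem.List.enumerate_cons, List.foldl_cons]
    cases st with
    | none =>
      by_cases hx : x = v
      · have hstep : altStep v (none, acc) (i, x) = (some i, acc) := by
          simp [altStep, hx]
        rw [hstep, ih (i + 1) (some i) acc N hN']
        simp [goRuns, hx]
      · have hstep : altStep v (none, acc) (i, x) = (none, acc) := by
          simp [altStep, hx]
        rw [hstep, ih (i + 1) none acc N hN']
        simp [goRuns, hx]
    | some s =>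
      by_cases hx : x = v
      · have hstep : altStep v (some s, acc) (i, x) = (some s, acc) := by
          simp [altStep, hx]
        rw [hstep, ih (i + 1) (some s) acc N hN']
        simp [goRuns, hx]
      · have hstep : altStep v (some s, acc) (i, x) = (none, acc ++ [(s, i)]) := by
          simp [altStep, hx]
        rw [hstep, ih (i + 1) none (acc ++ [(s, i)]) N hN']
        simp [goRuns, hx]

lemma runInner_eq (labels : List Int) (v : Int) (j : Int) (h0 : 0 ≤ j) :
    runInner labels v (labels.length : Int) j
      = j + (leadCount v (labels.drop j.toNat) : Int) := by
  have H : ∀ (k : Nat) (j : Int), 0 ≤ j → ((labels.length : Int) - j).toNat = k →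
      runInner labels v (labels.length : Int) j
        = j + (leadCount v (labels.drop j.toNat) : Int) := by
    intro k
    induction k using Nat.strong_induction_on with
    | _ k IH =>
      intro j hj hk
      by_cases hlt : j < (labels.length : Int)
      · have hjn : j.toNat < labels.length := by omega
        have hdrop : labels.drop j.toNat = labels[j.toNat] :: labels.drop (j.toNat + 1) :=
          List.drop_eq_getElem_cons hjn
        have hget : PySem.List.pyGetD labels j 0 = labels[j.toNat] :=
          PySem.List.pyGetD_eq_getElem _ _ (by omega) (by omega)
        by_cases hv : labels[j.toNat] = v
        · have hrec := IH ((labels.length : Int) - (j + 1)).toNat (by omega) (j + 1) (by omega) rfl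
          rw [runInner, dif_pos ⟨hlt, by rw [hget, hv]⟩, hrec]
          have : (j + 1).toNat = j.toNat + 1 := by omega
          rw [hdrop, this]
          simp only [leadCount, hv]
          push_cast
          ring
        · rw [runInner, dif_neg (by rw [hget]; tauto)]
          rw [hdrop]
          simp [leadCount, hv]
      · have : labels.drop j.toNat = [] := by
          apply List.drop_eq_nil_of_le; omega
        rw [runInner, dif_neg (by omega), this]
        simp [leadCount]
  exact H _ j h0 rfl

lemma runOuter_eq (labels : List Int) (v : Int) (i : Int) (runs : List (Int × Int))
    (h0 : 0 ≤ i) :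
    runOuter labels v (labels.length : Int) i runs
      = runs ++ goRuns v (labels.drop i.toNat) i none := by
  have H : ∀ (k : Nat) (i : Int) (runs : List (Int × Int)), 0 ≤ i →
      ((labels.length : Int) - i).toNat = k →
      runOuter labels v (labels.length : Int) i runs
        = runs ++ goRuns v (labels.drop i.toNat) i none := by
    intro k
    induction k using Nat.strong_induction_on with
    | _ k IH =>
      intro i runs hi hk
      by_cases hlt : i < (labels.length : Int)
      · have hin : i.toNat < labels.length := by omega
        have hdrop : labels.drop i.toNat = labels[i.toNat] :: labels.drop (i.toNat + 1) :=
          List.drop_eq_getElem_cons hin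
        have hget : PySem.List.pyGetD labels i 0 = labels[i.toNat] :=
          PySem.List.pyGetD_eq_getElem _ _ (by omega) (by omega)
        by_cases hv : labels[i.toNat] = v
        · -- run starts here
          have hlead := leadCount_le v (labels.drop (i.toNat + 1))
          have hlen : (labels.drop (i.toNat + 1)).length = labels.length - (i.toNat + 1) := by
            simp
          set L : Nat := leadCount v (labels.drop (i.toNat + 1)) with hL
          have hinner : runInner labels v (labels.length : Int) i = i + 1 + (L : Int) := by
            rw [runInner_eq labels v i (by omega), hdrop]
            simp only [leadCount, hv, ← hL]
            push_cast; ring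
          have hj0 : (0 : Int) ≤ i + 1 + (L : Int) := by omega
          have hjtoNat : (i + 1 + (L : Int)).toNat = i.toNat + 1 + L := by omega
          have hrec := IH ((labels.length : Int) - (i + 1 + (L : Int))).toNat (by omega)
            (i + 1 + (L : Int)) (runs ++ [(i, i + 1 + (L : Int))]) hj0 rfl
          rw [runOuter, dif_pos hlt, dif_neg (by rw [hget, hv]; simp)]
          simp only [hinner, hrec]
          have hdrop2 : labels.drop (i + 1 + (L : Int)).toNat
              = (labels.drop (i.toNat + 1)).drop L := by
            rw [hjtoNat, List.drop_drop]
          rw [hdrop2, hdrop]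
          have hgo : goRuns v (labels[i.toNat] :: labels.drop (i.toNat + 1)) i none
              = goRuns v (labels.drop (i.toNat + 1)) (i + 1) (some i) := by
            simp [goRuns, hv]
          rw [hgo, goRuns_some]
          simp only [← hL]
          simp
        · -- skip this element
          have hrec := IH ((labels.length : Int) - (i + 1)).toNat (by omega) (i + 1) runs
            (by omega) rfl
          rw [runOuter, dif_pos hlt, dif_pos (by rw [hget]; tauto), hrec]
          have : (i + 1).toNat = i.toNat + 1 := by omega
          rw [hdrop, this]
          simp [goRuns, hv]
      · have hnil : labels.drop i.toNat = [] := by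
          apply List.drop_eq_nil_of_le; omega
        rw [runOuter, dif_neg (by omega), hnil]
        simp [goRuns]
  exact H _ i runs h0 rfl

-- ===== VERDICT (by name: the statement is the Claim_ definition above) =====
theorem contiguous_runs_spec : Claim_equal_contiguous_runs := by
  intro labels value _
  unfold Spec_contiguous_runs contiguous_runs contiguous_runs_alt
  simp only [PySem.List.len_eq]
  rw [runOuter_eq labels value 0 [] le_rfl,
    fold_eq value labels 0 none [] (labels.length : Int) (by simp)]
  simp
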